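-- pv_equiv track=rewrite | github.com/livexords-nw/coinhunter-bot | main.py | find_all_locations_with_item
-- ===== SOURCE A (Python) =====
-- def find_all_locations_with_item(graph, items, current_location, target_item):
--     """
--     Find all locations where the target item can be farmed and return the paths to those locations.
--     """
--     from collections import deque
--
--     visited = set()
--     queue = deque([(current_location, [])])
--     locations_with_item = []
--
--     while queue:
--         location, path = queue.popleft()
--
--         if location in visited:
--             continue
--         visited.add(location)
--
--         current_path = path + [location]
--
--         if target_item in items.get(location, {}):
--             locations_with_item.append((location, current_path))
--
--         for neighbor in graph.get(location, []):
--             if neighbor not in visited: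
--                 queue.append((neighbor, current_path))
--
--     return locations_with_item
-- ===== SOURCE B (Python) =====
-- def find_all_locations_with_item(graph, items, current_location, target_item):
--     """
--     BFS with a predecessor map: the queue carries bare locations (no path copies);
--     paths are reconstructed from the parent map only for the matching locations.
--     """
--     from collections import deque
--
--     parent = {current_location: None}
--     visited = set()
--     queue = deque([current_location])
--     matches = []
--
--     while queue:
--         location = queue.popleft()
--         if location in visited:
--             continue
--         visited.add(location)
--
--         if target_item in items.get(location, {}):
--             matches.append(location)
--
--         for neighbor in graph.get(location, []):
--             if neighbor not in visited:
--                 parent.setdefault(neighbor, location)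
--                 queue.append(neighbor)
--
--     def path_to(loc):
--         path = []
--         while loc is not None:
--             path.append(loc)
--             loc = parent[loc]
--         path.reverse()
--         return path
--
--     return [(loc, path_to(loc)) for loc in matches]
-- ===== Notes on version B (the rewrite author's own statement) =====
-- stated objective: alternative
-- what changed: A's BFS carries a full path copy in every queue entry (path + [location] per enqueue); B's BFS queues bare locations and records a first-seen predecessor map, reconstructing paths from it only for the matching locations.
import Mathlib
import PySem

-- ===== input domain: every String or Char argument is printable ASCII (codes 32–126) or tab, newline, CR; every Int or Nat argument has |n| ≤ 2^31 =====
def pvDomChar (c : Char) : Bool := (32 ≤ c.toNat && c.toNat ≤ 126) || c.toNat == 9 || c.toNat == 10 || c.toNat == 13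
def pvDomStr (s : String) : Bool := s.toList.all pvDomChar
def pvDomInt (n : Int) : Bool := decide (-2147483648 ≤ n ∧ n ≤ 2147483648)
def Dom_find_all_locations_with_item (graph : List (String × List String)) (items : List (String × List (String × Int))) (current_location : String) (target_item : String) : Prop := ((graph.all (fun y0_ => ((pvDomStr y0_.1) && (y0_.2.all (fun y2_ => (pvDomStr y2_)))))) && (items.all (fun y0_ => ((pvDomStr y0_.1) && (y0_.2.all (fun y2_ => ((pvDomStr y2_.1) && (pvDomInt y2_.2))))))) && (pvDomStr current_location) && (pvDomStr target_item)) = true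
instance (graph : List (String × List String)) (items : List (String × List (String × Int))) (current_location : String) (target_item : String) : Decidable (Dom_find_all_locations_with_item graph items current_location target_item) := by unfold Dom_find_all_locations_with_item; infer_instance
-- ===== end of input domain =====

-- B replaces A's per-enqueue path copying by a predecessor map with on-demand path
-- reconstruction (objective: alternative algorithm). Return values proved equal on all inputs.

-- ===== PORT A =====
-- A's while-loop over the deque; the fuel argument only makes the recursion structural
-- (1 + sum of adjacency-list lengths bounds the number of pops, so it never runs out).
def findLoopA (graph : List (String × List String)) (items : List (String × List (String × Int))) (target_item : String) : Nat → List (String × List String) → PySem.Set String → List (String × List String) → List (String × List String)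
  | 0, _, _, acc => acc
  | _ + 1, [], _, acc => acc
  | fuel + 1, (location, path) :: queue, visited, acc =>
    if PySem.Set.contains visited location then
      findLoopA graph items target_item fuel queue visited acc
    else
      let visited' := PySem.Set.add visited location
      let current_path := path ++ [location]
      let acc' := if (PySem.Dict.getD (PySem.Dict.mk items) location []).any (fun kv => kv.1 == target_item)
                  then acc ++ [(location, current_path)] else acc
      let queue' := queue ++ ((PySem.Dict.getD (PySem.Dict.mk graph) location []).filter
                      (fun nb => !(PySem.Set.contains visited' nb))).map (fun nb => (nb, current_path))
      findLoopA graph items target_item fuel queue' visited' acc'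

def find_all_locations_with_item (graph : List (String × List String)) (items : List (String × List (String × Int))) (current_location : String) (target_item : String) : List (String × List String) :=
  findLoopA graph items target_item (1 + (graph.map (fun e => e.2.length)).sum)
    [(current_location, [])] PySem.Set.empty []

-- ===== PORT B =====
-- B's while-loop: bare locations in the queue, first-seen parent map (setdefault); same
-- fuel bound on the number of pops.
def findLoopB (graph : List (String × List String)) (items : List (String × List (String × Int))) (target_item : String) : Nat → List String → PySem.Set String → PySem.Dict String (Option String) → List String → List String × PySem.Dict String (Option String)
  | 0, _, _, parent, acc2 => (acc2, parent)
  | _ + 1, [], _, parent, acc2 => (acc2, parent)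
  | fuel + 1, location :: queue, visited, parent, acc2 =>
    if PySem.Set.contains visited location then
      findLoopB graph items target_item fuel queue visited parent acc2
    else
      let visited' := PySem.Set.add visited location
      let acc2' := if (PySem.Dict.getD (PySem.Dict.mk items) location []).any (fun kv => kv.1 == target_item)
                      then acc2 ++ [location] else acc2
      let pq := (PySem.Dict.getD (PySem.Dict.mk graph) location []).foldl
                  (fun pq nb => if PySem.Set.contains visited' nb then pq
                                else (PySem.Dict.setdefault pq.1 nb (some location), pq.2 ++ [nb]))
                  (parent, queue)
      findLoopB graph items target_item fuel pq.2 visited' pq.1 acc2'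

-- path_to: walk the parent chain, then reverse (fuel = map size + 1 bounds the chain;
-- the `none` fallback on a missing key is unreachable for maps built by findLoopB).
def pathToAux (parent : PySem.Dict String (Option String)) : Nat → Option String → List String → List String
  | 0, _, path => path.reverse
  | _ + 1, none, path => path.reverse
  | fuel + 1, some l, path =>
    match PySem.Dict.get? parent l with
    | some o => pathToAux parent fuel o (path ++ [l])
    | none => (path ++ [l]).reverse

def pathTo (parent : PySem.Dict String (Option String)) (l : String) : List String :=
  pathToAux parent (PySem.Dict.size parent + 1) (some l) []

def find_all_locations_with_item_alt (graph : List (String × List String)) (items : List (String × List (String × Int))) (current_location : String) (target_item : String) : List (String × List String) :=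
  let parent := PySem.Dict.mk [(current_location, (none : Option String))]
  let r := findLoopB graph items target_item (graph.foldl (fun n e => n + e.2.length) 1)
             [current_location] PySem.Set.empty parent []
  r.1.map (fun l => (l, pathTo r.2 l))

-- ===== PRECONDITION & SPEC =====
def Spec_find_all_locations_with_item (graph : List (String × List String)) (items : List (String × List (String × Int))) (current_location : String) (target_item : String) (out : List (String × List String)) : Prop := out = find_all_locations_with_item_alt graph items current_location target_item
instance (graph : List (String × List String)) (items : List (String × List (String × Int))) (current_location : String) (target_item : String) (out : List (String × List String)) : Decidable (Spec_find_all_locations_with_item graph items current_location target_item out) := by unfold Spec_find_all_locations_with_item; infer_instance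

-- ===== CLAIM (what is proved, stated in full; the proofs are below) =====
def Claim_equal_find_all_locations_with_item : Prop := ∀ (graph : List (String × List String)) (items : List (String × List (String × Int))) (current_location : String) (target_item : String), Dom_find_all_locations_with_item graph items current_location target_item → Spec_find_all_locations_with_item graph items current_location target_item (find_all_locations_with_item graph items current_location target_item)

-- ===== LEMMAS AND PROOFS =====

-- PChain parent o p: following parent pointers from o reaches the root and spells p
-- (root first, o's node last) — i.e. p is the path B's path_to reconstructs.
inductive PChain (parent : PySem.Dict String (Option String)) : Option String → List String → Prop
  | nil : PChain parent none []
  | cons {l : String} {o : Option String} {p : List String} :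
      PySem.Dict.get? parent l = some o → PChain parent o p → PChain parent (some l) (p ++ [l])

-- The invariant attached to an A-queue entry (l, p): p ++ [l] is l's reconstructible path.
def GoodPath (parent : PySem.Dict String (Option String)) (l : String) (p : List String) : Prop :=
  PChain parent (some l) (p ++ [l]) ∧ (p ++ [l]).Nodup ∧ ∀ x ∈ p ++ [l], PySem.Dict.contains parent x = true

def DExt (d d' : PySem.Dict String (Option String)) : Prop :=
  ∀ k v, PySem.Dict.get? d k = some v → PySem.Dict.get? d' k = some v

-- QRel parent qA qB vis: the two queues hold the same locations in order; each entry is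
-- either a re-enqueued duplicate (its location is visited or occurs earlier) or carries
-- the reconstructible path.  vis accumulates visited ∪ earlier locations.
def QRel (parent : PySem.Dict String (Option String)) : List (String × List String) → List String → List String → Prop
  | [], [], _ => True
  | (l, p) :: qA, l' :: qB, vis => l = l' ∧ (l ∈ vis ∨ GoodPath parent l p) ∧ QRel parent qA qB (l :: vis)
  | _, _, _ => False

def AccRel (parent : PySem.Dict String (Option String)) (acc : List (String × List String)) (accB : List String) : Prop :=
  List.Forall₂ (fun (e : String × List String) (l : String) =>
    e.1 = l ∧ PChain parent (some l) e.2 ∧ e.2.Nodup ∧ ∀ x ∈ e.2, PySem.Dict.contains parent x = true) acc accB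

lemma forall2_snoc {α β : Type} {R : α → β → Prop} {l : List α} {u : List β}
    (h : List.Forall₂ R l u) {a : α} {b : β} (hab : R a b) :
    List.Forall₂ R (l ++ [a]) (u ++ [b]) := by
  induction h with
  | nil => simpa using List.Forall₂.cons hab List.Forall₂.nil
  | cons hx _ ih => simpa using List.Forall₂.cons hx ih

lemma dext_refl (d : PySem.Dict String (Option String)) : DExt d d := fun _ _ h => h

lemma dext_trans {d e f : PySem.Dict String (Option String)} (h1 : DExt d e) (h2 : DExt e f) : DExt d f :=
  fun k v h => h2 k v (h1 k v h)

lemma dext_contains {d d' : PySem.Dict String (Option String)} (h : DExt d d') {k : String}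
    (hk : PySem.Dict.contains d k = true) : PySem.Dict.contains d' k = true := by
  rw [PySem.Dict.contains_eq_isSome_get?] at hk ⊢
  cases hg : PySem.Dict.get? d k with
  | none => rw [hg] at hk; simp at hk
  | some v => rw [h k v hg]; rfl

lemma pchain_mono {d d' : PySem.Dict String (Option String)} (h : DExt d d') {o : Option String}
    {p : List String} (hc : PChain d o p) : PChain d' o p := by
  induction hc with
  | nil => exact PChain.nil
  | cons hg _ ih => exact PChain.cons (h _ _ hg) ih

lemma goodpath_mono {d d' : PySem.Dict String (Option String)} (h : DExt d d') {l : String}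
    {p : List String} (hg : GoodPath d l p) : GoodPath d' l p :=
  ⟨pchain_mono h hg.1, hg.2.1, fun x hx => dext_contains h (hg.2.2 x hx)⟩

lemma accrel_mono {d d' : PySem.Dict String (Option String)} (h : DExt d d')
    {acc : List (String × List String)} {accB : List String} (ha : AccRel d acc accB) :
    AccRel d' acc accB := by
  refine List.Forall₂.imp ?_ ha
  rintro e l ⟨h1, h2, h3, h4⟩
  exact ⟨h1, pchain_mono h h2, h3, fun x hx => dext_contains h (h4 x hx)⟩

lemma qrel_mono {d d' : PySem.Dict String (Option String)} (h : DExt d d') :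
    ∀ {qA : List (String × List String)} {qB vis vis' : List String},
      (∀ x ∈ vis, x ∈ vis') → QRel d qA qB vis → QRel d' qA qB vis'
  | [], [], _, _, _, _ => trivial
  | (l, p) :: qA, l' :: qB, vis, vis', hv, hq => by
    obtain ⟨he, hd, ht⟩ := hq
    refine ⟨he, ?_, qrel_mono h (vis := l :: vis) ?_ ht⟩
    · rcases hd with hl | hg
      · exact Or.inl (hv l hl)
      · exact Or.inr (goodpath_mono h hg)
    · intro x hx
      rcases List.mem_cons.mp hx with h | h
      · exact h ▸ List.mem_cons_self
      · exact List.mem_cons_of_mem _ (hv x h)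
  | [], _ :: _, _, _, _, hq => hq.elim
  | (_, _) :: _, [], _, _, _, hq => hq.elim

lemma qrel_snoc (d : PySem.Dict String (Option String)) (x : String) (p : List String) :
    ∀ {qA : List (String × List String)} {qB vis : List String},
      QRel d qA qB vis → (x ∈ vis ∨ x ∈ qB ∨ GoodPath d x p) →
      QRel d (qA ++ [(x, p)]) (qB ++ [x]) vis
  | [], [], vis, _, hx => by
    refine ⟨rfl, ?_, trivial⟩
    rcases hx with h | h | h
    · exact Or.inl h
    · exact absurd h (List.not_mem_nil)
    · exact Or.inr h
  | (l, pp) :: qA, l' :: qB, vis, hq, hx => by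
    obtain ⟨he, hd, ht⟩ := hq
    subst he
    refine ⟨rfl, hd, qrel_snoc d x p ht ?_⟩
    rcases hx with h | h | h
    · exact Or.inl (List.mem_cons_of_mem _ h)
    · rcases List.mem_cons.mp h with h | h
      · exact Or.inl (h ▸ List.mem_cons_self)
      · exact Or.inr (Or.inl h)
    · exact Or.inr (Or.inr h)
  | [], _ :: _, _, hq, _ => hq.elim
  | (_, _) :: _, [], _, hq, _ => hq.elim

-- One pass over the adjacency list: B's setdefault/enqueue fold mirrors A's filter+map append.
lemma fold_step (loc : String) (cp : List String) (visited' : List String) :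
    ∀ (adj : List String) (parent : PySem.Dict String (Option String))
      (qA : List (String × List String)) (qB : List String),
      QRel parent qA qB visited' →
      PChain parent (some loc) cp → cp.Nodup →
      (∀ x ∈ cp, PySem.Dict.contains parent x = true) →
      (∀ k, PySem.Dict.contains parent k = true → k ∈ visited' ∨ k ∈ qB) →
      let r := adj.foldl
        (fun pq nb => if PySem.Set.contains visited' nb then pq
                      else (PySem.Dict.setdefault pq.1 nb (some loc), pq.2 ++ [nb]))
        (parent, qB)
      DExt parent r.1 ∧
      QRel r.1 (qA ++ (adj.filter (fun nb => !(PySem.Set.contains visited' nb))).map (fun nb => (nb, cp))) r.2 visited' ∧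
      (∀ k, PySem.Dict.contains r.1 k = true → k ∈ visited' ∨ k ∈ r.2)
  | [], parent, qA, qB, hq, _, _, _, h5 => by
    simpa using ⟨dext_refl parent, hq, h5⟩
  | nb :: adj, parent, qA, qB, hq, h2, h3, h4, h5 => by
    by_cases hnbv : nb ∈ visited'
    · simpa [hnbv] using fold_step loc cp visited' adj parent qA qB hq h2 h3 h4 h5
    · by_cases hc : PySem.Dict.contains parent nb = true
      · -- nb already has a parent: setdefault is a no-op; the entry is a duplicate
        have hsd : PySem.Dict.setdefault parent nb (some loc) = parent :=
          PySem.Dict.setdefault_of_contains parent _ hc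
        have hnbq : nb ∈ qB := by
          rcases h5 nb hc with h | h
          · exact absurd h hnbv
          · exact h
        have hq' : QRel parent (qA ++ [(nb, cp)]) (qB ++ [nb]) visited' :=
          qrel_snoc parent nb cp hq (Or.inr (Or.inl hnbq))
        have h5' : ∀ k, PySem.Dict.contains parent k = true → k ∈ visited' ∨ k ∈ qB ++ [nb] := by
          intro k hk
          rcases h5 k hk with h | h
          · exact Or.inl h
          · exact Or.inr (List.mem_append_left _ h)
        have hvb : PySem.Set.contains visited' nb = false := by
          simp [PySem.Set.contains_eq_listContains]; exact hnbv
        have hrec := fold_step loc cp visited' adj parent (qA ++ [(nb, cp)]) (qB ++ [nb]) hq' h2 h3 h4 h5'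
        rw [List.append_assoc] at hrec
        simp only [List.singleton_append] at hrec
        simp only [List.foldl_cons, hvb, Bool.false_eq_true, if_false, hsd,
          List.filter_cons, Bool.not_false, if_true, List.map_cons]
        exact hrec
      · -- fresh node: parent gains nb ↦ loc, and (nb, cp) is a good path
        have hc' : PySem.Dict.contains parent nb = false := by
          cases h : PySem.Dict.contains parent nb
          · rfl
          · exact absurd h hc
        have hsd : PySem.Dict.setdefault parent nb (some loc) = PySem.Dict.insert parent nb (some loc) :=
          PySem.Dict.setdefault_of_not_contains parent _ hc'
        set parent' := PySem.Dict.insert parent nb (some loc) with hp'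
        have hext : DExt parent parent' := by
          intro k v hk
          have hkne : k ≠ nb := by
            intro h; subst h
            rw [PySem.Dict.contains_eq_isSome_get?, hk] at hc'
            simp at hc'
          rw [PySem.Dict.get?_insert_of_ne parent _ hkne]
          exact hk
        have hnbcp : nb ∉ cp := by
          intro h
          exact absurd (h4 nb h) (by simp [hc'])
        have hgood : GoodPath parent' nb cp := by
          refine ⟨PChain.cons (PySem.Dict.get?_insert_self parent nb (some loc)) (pchain_mono hext h2), ?_, ?_⟩
          · simp [List.nodup_append, h3]
            intro a ha hb
            subst hb
            exact hnbcp ha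
          · intro x hx
            rcases List.mem_append.mp hx with hx | hx
            · exact dext_contains hext (h4 x hx)
            · have hxe : x = nb := by simpa using hx
              rw [hxe, hp']
              exact PySem.Dict.contains_insert_self parent nb (some loc)
        have hq' : QRel parent' (qA ++ [(nb, cp)]) (qB ++ [nb]) visited' :=
          qrel_snoc parent' nb cp (qrel_mono hext (fun _ h => h) hq) (Or.inr (Or.inr hgood))
        have h5' : ∀ k, PySem.Dict.contains parent' k = true → k ∈ visited' ∨ k ∈ qB ++ [nb] := by
          intro k hk
          rw [hp', PySem.Dict.contains_insert] at hk
          rcases Bool.or_eq_true_iff.mp hk with h | h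
          · exact Or.inr (List.mem_append_right _ (by simpa using (eq_of_beq h)))
          · rcases h5 k h with h' | h'
            · exact Or.inl h'
            · exact Or.inr (List.mem_append_left _ h')
        have hvb : PySem.Set.contains visited' nb = false := by
          simp [PySem.Set.contains_eq_listContains]; exact hnbv
        have hrec := fold_step loc cp visited' adj parent' (qA ++ [(nb, cp)]) (qB ++ [nb]) hq'
          (pchain_mono hext h2) h3 (fun x hx => dext_contains hext (h4 x hx)) h5'
        obtain ⟨r1, r3, r4⟩ := hrec
        rw [List.append_assoc] at r3
        simp only [List.singleton_append] at r3
        simp only [List.foldl_cons, hvb, Bool.false_eq_true, if_false, hsd,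
          List.filter_cons, Bool.not_false, if_true, List.map_cons]
        exact ⟨dext_trans hext r1, r3, r4⟩

-- The main coupling: run both loops with the same fuel; A's accumulated (location, path)
-- pairs stay reconstructible from B's (monotonically growing) parent map.
lemma loop_rel (graph : List (String × List String)) (items : List (String × List (String × Int))) (target_item : String) :
    ∀ (fuel : Nat) (qA : List (String × List String)) (qB : List String)
      (visited : PySem.Set String) (parent : PySem.Dict String (Option String))
      (acc : List (String × List String)) (accB : List String),
      QRel parent qA qB visited →
      AccRel parent acc accB →
      (∀ k, PySem.Dict.contains parent k = true → k ∈ visited ∨ k ∈ qB) →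
      (∀ v ∈ visited, PySem.Dict.contains parent v = true) →
      let r := findLoopB graph items target_item fuel qB visited parent accB
      DExt parent r.2 ∧
      AccRel r.2 (findLoopA graph items target_item fuel qA visited acc) r.1
  | 0, qA, qB, visited, parent, acc, accB, _, ha, _, _ => by
    exact ⟨dext_refl parent, ha⟩
  | _ + 1, [], [], visited, parent, acc, accB, _, ha, _, _ => by
    exact ⟨dext_refl parent, ha⟩
  | _ + 1, [], _ :: _, _, _, _, _, hq, _, _, _ => hq.elim
  | _ + 1, (_, _) :: _, [], _, _, _, _, hq, _, _, _ => hq.elim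
  | fuel + 1, (location, path) :: qA, l' :: qB, visited, parent, acc, accB, hq, ha, h5, hvc => by
    obtain ⟨he, hd, ht⟩ := hq
    subst he
    by_cases hv : PySem.Set.contains visited location = true
    · -- duplicate pop: both loops skip
      have hlv : location ∈ visited := by simpa [PySem.Set.contains] using hv
      have ht' : QRel parent qA qB visited := by
        refine qrel_mono (dext_refl parent) ?_ ht
        intro x hx
        rcases List.mem_cons.mp hx with h | h
        · exact h ▸ hlv
        · exact h
      have h5' : ∀ k, PySem.Dict.contains parent k = true → k ∈ visited ∨ k ∈ qB := by
        intro k hk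
        rcases h5 k hk with h | h
        · exact Or.inl h
        · rcases List.mem_cons.mp h with h | h
          · exact Or.inl (h ▸ hlv)
          · exact Or.inr h
      have := loop_rel graph items target_item fuel qA qB visited parent acc accB ht' ha h5' hvc
      simpa [findLoopA, findLoopB, hlv] using this
    · -- genuine visit
      have hlnv : location ∉ visited := fun h => hv (by simpa [PySem.Set.contains] using h)
      have hgood : GoodPath parent location path := by
        rcases hd with h | h
        · exact absurd h hlnv
        · exact h
      have hvadd : PySem.Set.add visited location = visited ++ [location] :=
        PySem.Set.add_of_not_mem hlnv
      set cp := path ++ [location] with hcp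
      set visited' := PySem.Set.add visited location with hvis
      have hmemv : ∀ x, x ∈ visited' ↔ x ∈ visited ∨ x = location := by
        intro x; rw [hvis]; exact PySem.Set.mem_add visited location x
      -- the A/B result accumulators stay aligned
      have ha' : AccRel parent
          (if (PySem.Dict.getD (PySem.Dict.mk items) location []).any (fun kv => kv.1 == target_item)
           then acc ++ [(location, cp)] else acc)
          (if (PySem.Dict.getD (PySem.Dict.mk items) location []).any (fun kv => kv.1 == target_item)
           then accB ++ [location] else accB) := by
        split
        · exact forall2_snoc ha ⟨rfl, hgood.1, hgood.2.1, hgood.2.2⟩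
        · exact ha
      -- queue-tail relation, with visited' in place of visited
      have hq0 : QRel parent qA qB visited' := by
        refine qrel_mono (dext_refl parent) ?_ ht
        intro x hx
        rcases List.mem_cons.mp hx with h | h
        · exact (hmemv x).mpr (Or.inr h)
        · exact (hmemv x).mpr (Or.inl h)
      have h50 : ∀ k, PySem.Dict.contains parent k = true → k ∈ visited' ∨ k ∈ qB := by
        intro k hk
        rcases h5 k hk with h | h
        · exact Or.inl ((hmemv k).mpr (Or.inl h))
        · rcases List.mem_cons.mp h with h | h
          · exact Or.inl ((hmemv k).mpr (Or.inr h))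
          · exact Or.inr h
      have hfold := fold_step location cp visited'
        (PySem.Dict.getD (PySem.Dict.mk graph) location []) parent qA qB
        hq0 hgood.1 hgood.2.1 hgood.2.2 h50
      set r0 := (PySem.Dict.getD (PySem.Dict.mk graph) location []).foldl
        (fun pq nb => if PySem.Set.contains visited' nb then pq
                      else (PySem.Dict.setdefault pq.1 nb (some location), pq.2 ++ [nb]))
        (parent, qB) with hr0
      obtain ⟨hext, hqr, h5r⟩ := hfold
      have hvc' : ∀ v ∈ visited', PySem.Dict.contains r0.1 v = true := by
        intro v hvv
        rcases (hmemv v).mp hvv with h | h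
        · exact dext_contains hext (hvc v h)
        · subst h
          exact dext_contains hext (hgood.2.2 v (by simp))
      have hrec := loop_rel graph items target_item fuel
        (qA ++ ((PySem.Dict.getD (PySem.Dict.mk graph) location []).filter
          (fun nb => !(PySem.Set.contains visited' nb))).map (fun nb => (nb, cp)))
        r0.2 visited' r0.1
        (if (PySem.Dict.getD (PySem.Dict.mk items) location []).any (fun kv => kv.1 == target_item)
         then acc ++ [(location, cp)] else acc)
        (if (PySem.Dict.getD (PySem.Dict.mk items) location []).any (fun kv => kv.1 == target_item)
         then accB ++ [location] else accB)
        hqr (accrel_mono hext ha') h5r hvc'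
      have hvb : PySem.Set.contains visited location = false := by
        simp [PySem.Set.contains_eq_listContains]; exact hlnv
      simp only [findLoopA, findLoopB, hvb, Bool.false_eq_true, if_false]
      rw [← hvis, ← hcp, ← hr0]
      exact ⟨dext_trans hext hrec.1, hrec.2⟩

-- Reconstruction: pathToAux follows exactly the chain PChain describes.
lemma pathToAux_eq (parent : PySem.Dict String (Option String)) {o : Option String} {p : List String}
    (hc : PChain parent o p) :
    ∀ (fuel : Nat) (path : List String), p.length ≤ fuel →
      pathToAux parent fuel o path = p ++ path.reverse := by
  induction hc with
  | nil =>
    intro fuel path _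
    cases fuel <;> simp [pathToAux]
  | @cons l o p hg _ ih =>
    intro fuel path hf
    cases fuel with
    | zero => simp at hf
    | succ fuel =>
      have : p.length ≤ fuel := by simpa using Nat.lt_succ_iff.mp (by simpa using hf)
      simp only [pathToAux, hg]
      rw [ih fuel (path ++ [l]) this]
      simp

lemma pathTo_eq (parent : PySem.Dict String (Option String))
    {l : String} {p : List String} (hc : PChain parent (some l) p) (hpn : p.Nodup)
    (hpk : ∀ x ∈ p, PySem.Dict.contains parent x = true) :
    pathTo parent l = p := by
  have hsub : p ⊆ PySem.Dict.keys parent := by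
    intro x hx
    exact (PySem.Dict.contains_iff_mem_keys parent x).mp (hpk x hx)
  have hlen : p.length ≤ (PySem.Dict.keys parent).length :=
    (List.subperm_of_subset hpn hsub).length_le
  have hsz : (PySem.Dict.keys parent).length = PySem.Dict.size parent := by
    simp [PySem.Dict.keys, PySem.Dict.size]
  unfold pathTo
  rw [pathToAux_eq parent hc (PySem.Dict.size parent + 1) [] (by omega)]
  simp

lemma accrel_result (parent : PySem.Dict String (Option String)) :
    ∀ {acc : List (String × List String)} {accB : List String},
      AccRel parent acc accB → acc = accB.map (fun l => (l, pathTo parent l)) := by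
  intro acc accB h
  induction h with
  | nil => rfl
  | cons h _ ih =>
    rename_i e l _ _
    obtain ⟨h1, h2, h3, h4⟩ := h
    simp only [List.map_cons, ← ih]
    congr 1
    rw [pathTo_eq parent h2 h3 h4]
    exact Prod.ext h1 rfl

lemma fuel_eq (graph : List (String × List String)) :
    graph.foldl (fun n e => n + e.2.length) 1 = 1 + (graph.map (fun e => e.2.length)).sum :=
  PySem.List.foldl_add_nat graph (fun e => e.2.length) 1

-- ===== VERDICT (by name: the statement is the Claim_ definition above) =====
theorem find_all_locations_with_item_spec : Claim_equal_find_all_locations_with_item := by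
  intro graph items current_location target_item _
  unfold Spec_find_all_locations_with_item
  unfold find_all_locations_with_item find_all_locations_with_item_alt
  rw [fuel_eq]
  set parent0 := PySem.Dict.mk [(current_location, (none : Option String))] with hp0
  have hg0 : GoodPath parent0 current_location [] := by
    refine ⟨?_, by simp, ?_⟩
    · have : PySem.Dict.get? parent0 current_location = some none := by
        simp [hp0, PySem.Dict.get?_mk_cons]
      simpa using PChain.cons this PChain.nil
    · intro x hx
      simp at hx
      subst hx
      simp [hp0, PySem.Dict.contains_mk]
  have h := loop_rel graph items target_item (1 + (graph.map (fun e => e.2.length)).sum)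
    [(current_location, [])] [current_location] PySem.Set.empty parent0 [] []
    ⟨rfl, Or.inr hg0, trivial⟩ List.Forall₂.nil
    (by
      intro k hk
      simp only [hp0, PySem.Dict.contains_mk] at hk
      right
      simp at hk
      exact List.mem_singleton.mpr hk.symm)
    (by intro v hv; simp [PySem.Set.empty] at hv)
  exact accrel_result _ h.2
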